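/- GENERATED by farm/mkstatement.py from design/units.tsv (unit `start_decoder.COMPOSITION`) and the Specs of Vorbis/Spec/*.lean — do not edit.
   THE STATEMENT of the proof unit `start_decoder.COMPOSITION`: the function `start_decoder` (2712 instructions) satisfies its contract,
   GIVEN THE STATEMENTS OF ITS 52 SEGMENTS (`Vorbis.Spec.StartDecoder.Seg<k> Lay μ u₀`: what the unit `start_decoder.<k>` proves).
   No machine code is walked: `ReachVia.trans` along the segments (the exit assertion of a segment is the entry assertion of
   its successor), an induction on the loop measures. What the names mean: Vorbis/Spec/Basic.lean. The theorem to prove: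
   `theorem start_decoder_COMPOSITION_ok : Vorbis.Spec.start_decoder_COMPOSITION.Statement`. -/
import Vorbis.Spec.StartDecoderA
import Vorbis.Spec.StartDecoderAt
import Vorbis.Spec.StartDecoderB
namespace Vorbis.Spec.start_decoder_COMPOSITION
open X86 X86.User Asan

/-- The statement of unit `start_decoder.COMPOSITION`. -/
def Statement : Prop :=
  ∀ (Lay : Layout) (_hLay : Lay.hi = 0x1000000) (μ : Microarch) (_hμ : UserX.MicroOK μ) (u₀ : State)
    (_h_start_decoder_1 : Vorbis.Spec.StartDecoder.Seg1 Lay μ u₀)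
    (_h_start_decoder_2 : Vorbis.Spec.StartDecoder.Seg2 Lay μ u₀)
    (_h_start_decoder_3 : Vorbis.Spec.StartDecoder.Seg3 Lay μ u₀)
    (_h_start_decoder_4 : Vorbis.Spec.StartDecoder.Seg4 Lay μ u₀)
    (_h_start_decoder_5 : Vorbis.Spec.StartDecoder.Seg5 Lay μ u₀)
    (_h_start_decoder_6 : Vorbis.Spec.StartDecoder.Seg6 Lay μ u₀)
    (_h_start_decoder_7 : Vorbis.Spec.StartDecoder.Seg7 Lay μ u₀)
    (_h_start_decoder_8 : Vorbis.Spec.StartDecoder.Seg8 Lay μ u₀)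
    (_h_start_decoder_9 : Vorbis.Spec.StartDecoder.Seg9 Lay μ u₀)
    (_h_start_decoder_ERR : Vorbis.Spec.StartDecoder.SegERR Lay μ u₀)
    (_h_start_decoder_C1 : Vorbis.Spec.StartDecoder.SegC1 Lay μ u₀)
    (_h_start_decoder_C2 : Vorbis.Spec.StartDecoder.SegC2 Lay μ u₀)
    (_h_start_decoder_C3 : Vorbis.Spec.StartDecoder.SegC3 Lay μ u₀)
    (_h_start_decoder_C4 : Vorbis.Spec.StartDecoder.SegC4 Lay μ u₀)
    (_h_start_decoder_C5 : Vorbis.Spec.StartDecoder.SegC5 Lay μ u₀)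
    (_h_start_decoder_C6 : Vorbis.Spec.StartDecoder.SegC6 Lay μ u₀)
    (_h_start_decoder_C7 : Vorbis.Spec.StartDecoder.SegC7 Lay μ u₀)
    (_h_start_decoder_C8 : Vorbis.Spec.StartDecoder.SegC8 Lay μ u₀)
    (_h_start_decoder_C9 : Vorbis.Spec.StartDecoder.SegC9 Lay μ u₀)
    (_h_start_decoder_C10 : Vorbis.Spec.StartDecoder.SegC10 Lay μ u₀)
    (_h_start_decoder_C11 : Vorbis.Spec.StartDecoder.SegC11 Lay μ u₀)
    (_h_start_decoder_C12 : Vorbis.Spec.StartDecoder.SegC12 Lay μ u₀)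
    (_h_start_decoder_C13 : Vorbis.Spec.StartDecoder.SegC13 Lay μ u₀)
    (_h_start_decoder_C14 : Vorbis.Spec.StartDecoder.SegC14 Lay μ u₀)
    (_h_start_decoder_C15 : Vorbis.Spec.StartDecoder.SegC15 Lay μ u₀)
    (_h_start_decoder_C16 : Vorbis.Spec.StartDecoder.SegC16 Lay μ u₀)
    (_h_start_decoder_F1 : Vorbis.Spec.StartDecoder.SegF1 Lay μ u₀)
    (_h_start_decoder_F2 : Vorbis.Spec.StartDecoder.SegF2 Lay μ u₀)
    (_h_start_decoder_F3 : Vorbis.Spec.StartDecoder.SegF3 Lay μ u₀)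
    (_h_start_decoder_F4 : Vorbis.Spec.StartDecoder.SegF4 Lay μ u₀)
    (_h_start_decoder_F5 : Vorbis.Spec.StartDecoder.SegF5 Lay μ u₀)
    (_h_start_decoder_F6 : Vorbis.Spec.StartDecoder.SegF6 Lay μ u₀)
    (_h_start_decoder_F7 : Vorbis.Spec.StartDecoder.SegF7 Lay μ u₀)
    (_h_start_decoder_R1 : Vorbis.Spec.StartDecoder.SegR1 Lay μ u₀)
    (_h_start_decoder_R2 : Vorbis.Spec.StartDecoder.SegR2 Lay μ u₀)
    (_h_start_decoder_R3 : Vorbis.Spec.StartDecoder.SegR3 Lay μ u₀)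
    (_h_start_decoder_R4 : Vorbis.Spec.StartDecoder.SegR4 Lay μ u₀)
    (_h_start_decoder_R5 : Vorbis.Spec.StartDecoder.SegR5 Lay μ u₀)
    (_h_start_decoder_R6 : Vorbis.Spec.StartDecoder.SegR6 Lay μ u₀)
    (_h_start_decoder_R7 : Vorbis.Spec.StartDecoder.SegR7 Lay μ u₀)
    (_h_start_decoder_R8 : Vorbis.Spec.StartDecoder.SegR8 Lay μ u₀)
    (_h_start_decoder_R9 : Vorbis.Spec.StartDecoder.SegR9 Lay μ u₀)
    (_h_start_decoder_R10 : Vorbis.Spec.StartDecoder.SegR10 Lay μ u₀)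
    (_h_start_decoder_R11 : Vorbis.Spec.StartDecoder.SegR11 Lay μ u₀)
    (_h_start_decoder_R12 : Vorbis.Spec.StartDecoder.SegR12 Lay μ u₀)
    (_h_start_decoder_R13 : Vorbis.Spec.StartDecoder.SegR13 Lay μ u₀)
    (_h_start_decoder_R14 : Vorbis.Spec.StartDecoder.SegR14 Lay μ u₀)
    (_h_start_decoder_R15 : Vorbis.Spec.StartDecoder.SegR15 Lay μ u₀)
    (_h_start_decoder_R16 : Vorbis.Spec.StartDecoder.SegR16 Lay μ u₀)
    (_h_start_decoder_R17 : Vorbis.Spec.StartDecoder.SegR17 Lay μ u₀)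
    (_h_start_decoder_R18 : Vorbis.Spec.StartDecoder.SegR18 Lay μ u₀)
    (_h_start_decoder_R19 : Vorbis.Spec.StartDecoder.SegR19 Lay μ u₀),
    ∀ (len : Nat) (A0 : Arena × List Obj) (frames : List (Nat × FrameLayout)), Calls Lay μ Vorbis.WayInv (Vorbis.conv u₀) Vorbis.L.start_decoder.entry (Vorbis.Spec.start_decoder.spec len A0 frames)

end Vorbis.Spec.start_decoder_COMPOSITION
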